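-- pv_equiv track=rewrite | github.com/touge13/Algorithms | TrainingAlgorithms6.0/4 (8 из 10)/F.py | process_employee
-- ===== SOURCE A (Python) =====
-- def process_employee(tree, employee, coins):
--     total_coins = 0
--     total_tasks = 1
--
--     if employee not in tree:
--         coins[employee - 1] = 1
--         return 1, 1
--
--     for subordinate in tree[employee]:
--         coins_from_sub, tasks = process_employee(tree, subordinate, coins)
--         total_coins += coins_from_sub
--         total_tasks += tasks
--
--     total_coins += total_tasks
--     coins[employee - 1] = total_coins
--     return total_coins, total_tasks
-- ===== SOURCE B (Python) =====
-- def process_employee(tree, employee, coins):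
--     # Iterative breadth-first level scan instead of post-order recursion.
--     # tasks(e) = number of node occurrences in the unfolded subtree = sum of level sizes;
--     # coins(e) = sum over occurrences m of tasks(m) = sum over levels of depth * level size
--     # (each occurrence is counted once by itself and once by each of its ancestors).
--     # NOTE: equivalence is about the return value only; unlike A, B does not write into coins.
--     total_coins = 0
--     total_tasks = 0
--     depth = 1
--     level = [employee]
--     while level:
--         total_tasks += len(level)
--         total_coins += depth * len(level)
--         level = [c for n in level if n in tree for c in tree[n]]
--         depth += 1
--     return total_coins, total_tasks
-- ===== Notes on version B (the rewrite author's own statement) =====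
-- stated objective: alternative
-- what changed: Replaces the post-order recursion by an iterative breadth-first level scan using the identities tasks = sum of level sizes and coins = sum of depth times level size over the unfolded subtree; return value only, B does not fill the coins array.
import Mathlib
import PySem

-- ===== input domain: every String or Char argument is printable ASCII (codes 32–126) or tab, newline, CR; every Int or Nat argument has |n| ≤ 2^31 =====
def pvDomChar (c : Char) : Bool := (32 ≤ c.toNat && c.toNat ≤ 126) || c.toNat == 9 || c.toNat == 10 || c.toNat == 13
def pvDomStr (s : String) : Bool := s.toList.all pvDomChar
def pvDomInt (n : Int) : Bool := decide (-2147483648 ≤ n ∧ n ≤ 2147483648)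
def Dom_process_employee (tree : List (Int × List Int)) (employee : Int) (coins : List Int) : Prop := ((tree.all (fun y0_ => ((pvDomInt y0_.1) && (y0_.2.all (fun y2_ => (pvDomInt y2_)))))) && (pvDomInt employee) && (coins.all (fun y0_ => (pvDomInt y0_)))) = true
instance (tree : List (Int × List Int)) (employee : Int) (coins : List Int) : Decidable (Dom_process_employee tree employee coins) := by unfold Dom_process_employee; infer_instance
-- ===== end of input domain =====

-- B replaces A's post-order recursion by an iterative breadth-first level scan (alternative
-- decomposition, same cost). The equivalence proved here is about the RETURN value only:
-- Python A writes coins[n-1] for every visited node n (an in-place mutation the caller can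
-- observe) while Python B does not; those writes never feed back into A's return value, and
-- inside Pre_ they cannot raise, so both ports model the return value and drop the write.

-- ===== PORT A =====
-- fuel tree.length + 1 suffices: Pre_ says there is no chain of tree keys longer than tree.length.
def pvGoA : Nat → PySem.Dict Int (List Int) → Int → Option (Int × Int)
  | 0, _, _ => none
  | f+1, t, n =>
    match t.get? n with
    | none => some (1, 1)
    | some subs =>
      -- the for-loop over tree[employee], accumulating (total_coins, total_tasks);
      -- none models an exception propagating out of the recursive call
      match subs.foldl
          (fun acc s =>
            match acc with
            | none => none
            | some (tc, tt) =>
              match pvGoA f t s with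
              | none => none
              | some (c, k) => some (tc + c, tt + k))
          (some ((0 : Int), (1 : Int))) with
      | none => none
      | some (tc, tt) => some (tc + tt, tt)

def process_employee (tree : List (Int × List Int)) (employee : Int) (coins : List Int) : Int × Int :=
  (pvGoA (tree.length + 1) (PySem.Dict.ofList tree) employee).getD (0, 0)

-- ===== PORT B =====
-- [c for n in level if n in tree for c in tree[n]]
def pvNext (t : PySem.Dict Int (List Int)) (level : List Int) : List Int :=
  level.flatMap (fun n => (t.get? n).getD [])

-- the while-loop of B; fuel tree.length + 1 bounds the number of nonempty levels under Pre_
def pvGoB : Nat → PySem.Dict Int (List Int) → List Int → Int → Int → Int → Int × Int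
  | 0, _, _, _, tc, tt => (tc, tt)
  | f+1, t, level, depth, tc, tt =>
    match level with
    | [] => (tc, tt)
    | _ :: _ =>
      pvGoB f t (pvNext t level) (depth + 1) (tc + depth * (level.length : Int)) (tt + (level.length : Int))

def process_employee_alt (tree : List (Int × List Int)) (employee : Int) (coins : List Int) : Int × Int :=
  pvGoB (tree.length + 1) (PySem.Dict.ofList tree) [employee] 1 0 0

-- ===== PRECONDITION & SPEC =====
-- pvHasPath f t n: a shape property of the input graph (not a run of either port): there
-- exists a chain of f supervisor→subordinate edges starting at n through keys of t
def pvHasPath : Nat → PySem.Dict Int (List Int) → Int → Bool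
  | 0, _, _ => true
  | f+1, t, n =>
    match t.get? n with
    | none => false
    | some subs => subs.any (pvHasPath f t)

-- pvOk len f t n: every node reachable from n within f edges lies in [1-len, len]
-- (exactly the labels whose write coins[label-1] does not raise IndexError)
def pvOk (len : Int) : Nat → PySem.Dict Int (List Int) → Int → Bool
  | 0, _, n => decide (1 - len ≤ n ∧ n ≤ len)
  | f+1, t, n =>
    decide (1 - len ≤ n ∧ n ≤ len) &&
      (match t.get? n with
       | none => true
       | some subs => subs.all (pvOk len f t))

-- Pre_ holds exactly when A returns normally: no chain of tree.length + 1 edges from employee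
-- (otherwise a key repeats on it, giving a reachable cycle, hence RecursionError), and every
-- reachable node label n keeps the write coins[n-1] in range (otherwise IndexError).
def Pre_process_employee (tree : List (Int × List Int)) (employee : Int) (coins : List Int) : Prop :=
  pvHasPath (tree.length + 1) (PySem.Dict.ofList tree) employee = false ∧
  pvOk (coins.length : Int) (tree.length + 1) (PySem.Dict.ofList tree) employee = true

instance (tree : List (Int × List Int)) (employee : Int) (coins : List Int) : Decidable (Pre_process_employee tree employee coins) := by
  unfold Pre_process_employee; infer_instance

def pvWitness_process_employee : (List (Int × List Int)) × Int × List Int :=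
  ([(1, [2, 3]), (2, [3])], 1, [0, 0, 0])

def Spec_process_employee (tree : List (Int × List Int)) (employee : Int) (coins : List Int) (out : Int × Int) : Prop := out = process_employee_alt tree employee coins
instance (tree : List (Int × List Int)) (employee : Int) (coins : List Int) (out : Int × Int) : Decidable (Spec_process_employee tree employee coins out) := by unfold Spec_process_employee; infer_instance

-- ===== CLAIM (what is proved, stated in full; the proofs are below) =====
def Claim_equal_process_employee : Prop := ∀ (tree : List (Int × List Int)) (employee : Int) (coins : List Int), Dom_process_employee tree employee coins → Pre_process_employee tree employee coins → Spec_process_employee tree employee coins (process_employee tree employee coins)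

-- ===== LEMMAS AND PROOFS =====

-- spec-level sums of the A-side values over a list of nodes
def pvCSum (f : Nat) (t : PySem.Dict Int (List Int)) (level : List Int) : Int :=
  (level.map (fun n => ((pvGoA f t n).getD (0, 0)).1)).sum

def pvTSum (f : Nat) (t : PySem.Dict Int (List Int)) (level : List Int) : Int :=
  (level.map (fun n => ((pvGoA f t n).getD (0, 0)).2)).sum

theorem pvCSum_nil (f : Nat) (t : PySem.Dict Int (List Int)) : pvCSum f t [] = 0 := rfl
theorem pvTSum_nil (f : Nat) (t : PySem.Dict Int (List Int)) : pvTSum f t [] = 0 := rfl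

theorem pvCSum_cons (f : Nat) (t : PySem.Dict Int (List Int)) (n : Int) (l : List Int) :
    pvCSum f t (n :: l) = ((pvGoA f t n).getD (0, 0)).1 + pvCSum f t l := by
  simp [pvCSum]

theorem pvTSum_cons (f : Nat) (t : PySem.Dict Int (List Int)) (n : Int) (l : List Int) :
    pvTSum f t (n :: l) = ((pvGoA f t n).getD (0, 0)).2 + pvTSum f t l := by
  simp [pvTSum]

theorem pvCSum_append (f : Nat) (t : PySem.Dict Int (List Int)) (l l' : List Int) :
    pvCSum f t (l ++ l') = pvCSum f t l + pvCSum f t l' := by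
  simp [pvCSum]

theorem pvTSum_append (f : Nat) (t : PySem.Dict Int (List Int)) (l l' : List Int) :
    pvTSum f t (l ++ l') = pvTSum f t l + pvTSum f t l' := by
  simp [pvTSum]

-- the for-loop of A succeeds and computes the sums, given success of the recursive calls
theorem pv_foldA (f : Nat) (t : PySem.Dict Int (List Int))
    (hrec : ∀ s : Int, pvHasPath f t s = false → ∃ v, pvGoA f t s = some v) :
    ∀ (subs : List Int) (tc tt : Int), (∀ s ∈ subs, pvHasPath f t s = false) →
      subs.foldl
          (fun acc s =>
            match acc with
            | none => none
            | some (tc, tt) =>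
              match pvGoA f t s with
              | none => none
              | some (c, k) => some (tc + c, tt + k))
          (some (tc, tt)) = some (tc + pvCSum f t subs, tt + pvTSum f t subs) := by
  intro subs
  induction subs with
  | nil => intro tc tt _; simp [pvCSum_nil, pvTSum_nil]
  | cons s rest ih =>
    intro tc tt h
    obtain ⟨v, hv⟩ := hrec s (h s (by simp))
    have hrest : ∀ s ∈ rest, pvHasPath f t s = false := fun x hx => h x (by simp [hx])
    simp only [List.foldl_cons, hv]
    rw [ih (tc + v.1) (tt + v.2) hrest]
    rw [pvCSum_cons, pvTSum_cons, hv]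
    simp only [Option.getD_some, Option.some.injEq, Prod.mk.injEq]
    constructor <;> ring

-- recursion succeeds when no chain of f edges leaves n
theorem pv_goA_isSome (t : PySem.Dict Int (List Int)) :
    ∀ (f : Nat) (n : Int), pvHasPath f t n = false → ∃ v, pvGoA f t n = some v := by
  intro f
  induction f with
  | zero => intro n h; simp [pvHasPath] at h
  | succ f ih =>
    intro n h
    cases hg : t.get? n with
    | none => exact ⟨(1, 1), by simp [pvGoA, hg]⟩
    | some subs =>
      simp only [pvHasPath, hg] at h
      have hall : ∀ s ∈ subs, pvHasPath f t s = false := by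
        intro s hs
        by_contra hb
        have : subs.any (pvHasPath f t) = true :=
          List.any_eq_true.mpr ⟨s, hs, by revert hb; cases pvHasPath f t s <;> simp⟩
        simp [this] at h
      refine ⟨(0 + pvCSum f t subs + (1 + pvTSum f t subs), 1 + pvTSum f t subs), ?_⟩
      simp only [pvGoA, hg, pv_foldA f t ih subs 0 1 hall]

-- children of a node, as the next-level contribution
theorem pv_next_cons (t : PySem.Dict Int (List Int)) (n : Int) (l : List Int) :
    pvNext t (n :: l) = (t.get? n).getD [] ++ pvNext t l := by
  simp [pvNext]

-- hasPath propagates to the next level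
theorem pv_hasPath_next (t : PySem.Dict Int (List Int)) (f : Nat) (level : List Int)
    (h : ∀ n ∈ level, pvHasPath (f + 1) t n = false) :
    ∀ m ∈ pvNext t level, pvHasPath f t m = false := by
  intro m hm
  simp only [pvNext, List.mem_flatMap] at hm
  obtain ⟨n, hn, hmn⟩ := hm
  have hh := h n hn
  unfold pvHasPath at hh
  cases hg : t.get? n with
  | none => rw [hg] at hmn; simp at hmn
  | some subs =>
    rw [hg] at hh hmn
    simp only [Option.getD_some] at hmn
    by_contra hb
    have : subs.any (pvHasPath f t) = true :=
      List.any_eq_true.mpr ⟨m, hmn, by revert hb; cases pvHasPath f t m <;> simp⟩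
    simp [this] at hh

-- one node of A, in terms of the sums over its children
theorem pv_goA_succ (t : PySem.Dict Int (List Int)) (f : Nat) (n : Int)
    (h : pvHasPath (f + 1) t n = false) :
    pvGoA (f + 1) t n =
      some (1 + pvTSum f t ((t.get? n).getD []) + pvCSum f t ((t.get? n).getD []),
            1 + pvTSum f t ((t.get? n).getD [])) := by
  cases hg : t.get? n with
  | none => simp [pvGoA, hg, pvCSum_nil, pvTSum_nil]
  | some subs =>
    simp only [pvHasPath, hg] at h
    have hall : ∀ s ∈ subs, pvHasPath f t s = false := by
      intro s hs
      by_contra hb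
      have : subs.any (pvHasPath f t) = true :=
        List.any_eq_true.mpr ⟨s, hs, by revert hb; cases pvHasPath f t s <;> simp⟩
      simp [this] at h
    simp only [pvGoA, hg, pv_foldA f t (pv_goA_isSome t f) subs 0 1 hall,
      Option.getD_some, Option.some.injEq, Prod.mk.injEq]
    constructor <;> first | trivial | ring

-- the level recurrences
theorem pv_tSum_succ (t : PySem.Dict Int (List Int)) (f : Nat) (level : List Int)
    (h : ∀ n ∈ level, pvHasPath (f + 1) t n = false) :
    pvTSum (f + 1) t level = (level.length : Int) + pvTSum f t (pvNext t level) := by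
  induction level with
  | nil => simp [pvTSum_nil, pvNext]
  | cons n rest ih =>
    rw [pvTSum_cons, pv_next_cons, pvTSum_append, pv_goA_succ t f n (h n (by simp)),
        ih (fun x hx => h x (by simp [hx]))]
    simp only [Option.getD_some, List.length_cons]
    push_cast
    ring

theorem pv_cSum_succ (t : PySem.Dict Int (List Int)) (f : Nat) (level : List Int)
    (h : ∀ n ∈ level, pvHasPath (f + 1) t n = false) :
    pvCSum (f + 1) t level = pvTSum (f + 1) t level + pvCSum f t (pvNext t level) := by
  induction level with
  | nil => simp [pvCSum_nil, pvTSum_nil, pvNext]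
  | cons n rest ih =>
    rw [pvCSum_cons, pvTSum_cons, pv_next_cons, pvCSum_append,
        pv_goA_succ t f n (h n (by simp)), ih (fun x hx => h x (by simp [hx])),
        pv_tSum_succ t f rest (fun x hx => h x (by simp [hx]))]
    simp only [Option.getD_some]
    ring

-- the while-loop of B computes the sums
theorem pv_goB_eq (t : PySem.Dict Int (List Int)) :
    ∀ (f : Nat) (level : List Int) (depth tc tt : Int),
      (∀ n ∈ level, pvHasPath f t n = false) →
      pvGoB f t level depth tc tt =
        (tc + pvCSum f t level + (depth - 1) * pvTSum f t level, tt + pvTSum f t level) := by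
  intro f
  induction f with
  | zero =>
    intro level depth tc tt h
    cases level with
    | nil => simp [pvGoB, pvCSum_nil, pvTSum_nil]
    | cons n rest => exact absurd (h n (by simp)) (by simp [pvHasPath])
  | succ f ih =>
    intro level depth tc tt h
    cases level with
    | nil => simp [pvGoB, pvCSum_nil, pvTSum_nil]
    | cons n rest =>
      simp only [pvGoB]
      rw [ih (pvNext t (n :: rest)) (depth + 1) _ _ (pv_hasPath_next t f (n :: rest) h),
          pv_cSum_succ t f (n :: rest) h, pv_tSum_succ t f (n :: rest) h]
      simp only [Prod.mk.injEq]
      constructor <;> ring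

-- ===== VERDICT (by name: the statement is the Claim_ definition above) =====
theorem process_employee_spec : Claim_equal_process_employee := by
  intro tree employee coins _ hpre
  unfold Spec_process_employee process_employee process_employee_alt
  obtain ⟨hpath, _⟩ := hpre
  have hsingle : ∀ n ∈ [employee],
      pvHasPath (tree.length + 1) (PySem.Dict.ofList tree) n = false := by
    intro n hn; simp at hn; subst hn; exact hpath
  rw [pv_goB_eq (PySem.Dict.ofList tree) (tree.length + 1) [employee] 1 0 0 hsingle]
  obtain ⟨⟨c, k⟩, hv⟩ := pv_goA_isSome (PySem.Dict.ofList tree) (tree.length + 1) employee hpath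
  rw [hv]
  simp [pvCSum, pvTSum, hv]
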